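-- pv_equiv track=rewrite | github.com/nmi21/euler | 086/main.py | num_integral_paths
-- ===== SOURCE A (Python) =====
-- def num_integral_paths(max_len):
--     count = 0
--     cuboids = []
--     squares = set(i * i for i in range(1, 3 * max_len))
--
--     for x in range(1, max_len + 1):
--         for y in range(x, max_len + 1):
--             for z in range(y, max_len + 1):
--                 diag1sq = x*x + (y+z)*(y+z)
--                 diag2sq = y*y + (x+z)*(x+z)
--                 diag3sq = z*z + (x+y)*(x+y)
--
--                 min_diagsq = min(diag1sq, diag2sq, diag3sq)
--                 if min_diagsq in squares:
--                     count += 1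
--                     cuboids.append((x, y, z))
--
--     return count, cuboids
-- ===== SOURCE B (Python) =====
-- def num_integral_paths(max_len):
--     count = 0
--     cuboids = []
--     squares = set(i * i for i in range(1, 3 * max_len))
--
--     # For a <= b <= c the shortest surface path squared is c*c + (a+b)*(a+b),
--     # so precompute, for every possible s = x + y, the z with z*z + s*s a perfect square.
--     table = {}
--     for s in range(2, 2 * max_len + 1):
--         table[s] = [z for z in range(1, max_len + 1) if z * z + s * s in squares]
--
--     for x in range(1, max_len + 1):
--         for y in range(x, max_len + 1):
--             for z in table[x + y]:
--                 if z >= y: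
--                     count += 1
--                     cuboids.append((x, y, z))
--
--     return count, cuboids
-- ===== Notes on version B (the rewrite author's own statement) =====
-- stated objective: faster
-- what changed: For x<=y<=z the minimal diagonal square is always z^2+(x+y)^2, so B precomputes for each s=x+y the list of z making z^2+s^2 a perfect square and replaces A's inner z scan (with three diagonals and a min) by a lookup in that table.
import Mathlib
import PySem

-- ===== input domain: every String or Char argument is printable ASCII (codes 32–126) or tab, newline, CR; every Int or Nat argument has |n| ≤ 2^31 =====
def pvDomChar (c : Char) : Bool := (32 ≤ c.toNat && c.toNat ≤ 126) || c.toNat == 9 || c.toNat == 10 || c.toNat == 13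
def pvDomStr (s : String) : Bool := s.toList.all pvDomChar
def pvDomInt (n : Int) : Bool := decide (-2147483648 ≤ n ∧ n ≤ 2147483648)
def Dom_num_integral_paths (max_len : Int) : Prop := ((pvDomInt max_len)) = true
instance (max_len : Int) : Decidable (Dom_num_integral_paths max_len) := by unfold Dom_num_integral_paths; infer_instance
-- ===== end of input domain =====

-- B replaces A's inner z scan by a precomputed table, keyed by x+y, of the z making the
-- shortest surface path integral (faster, asymptotic: O(n^2 + output) vs A's O(n^3)).

-- ===== PORT A =====
def num_integral_paths (max_len : Int) : Int × List (List Int) :=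
  let squares : PySem.Set Int :=
    PySem.Set.ofList ((PySem.List.pyRange 1 (3 * max_len) 1).map (fun i => i * i))
  (PySem.List.pyRange 1 (max_len + 1) 1).foldl (fun acc x =>
    (PySem.List.pyRange x (max_len + 1) 1).foldl (fun acc y =>
      (PySem.List.pyRange y (max_len + 1) 1).foldl (fun acc z =>
        let diag1sq := x * x + (y + z) * (y + z)
        let diag2sq := y * y + (x + z) * (x + z)
        let diag3sq := z * z + (x + y) * (x + y)
        let min_diagsq := min (min diag1sq diag2sq) diag3sq
        if squares.contains min_diagsq then (acc.1 + 1, acc.2 ++ [[x, y, z]]) else acc)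
        acc) acc) ((0 : Int), ([] : List (List Int)))

-- ===== PORT B =====
def num_integral_paths_alt (max_len : Int) : Int × List (List Int) :=
  let squares : PySem.Set Int :=
    PySem.Set.ofList ((PySem.List.pyRange 1 (3 * max_len) 1).map (fun i => i * i))
  let table : PySem.Dict Int (List Int) :=
    (PySem.List.pyRange 2 (2 * max_len + 1) 1).foldl (fun d s =>
      d.insert s ((PySem.List.pyRange 1 (max_len + 1) 1).filter
        (fun z => squares.contains (z * z + s * s)))) PySem.Dict.empty
  (PySem.List.pyRange 1 (max_len + 1) 1).foldl (fun acc x =>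
    (PySem.List.pyRange x (max_len + 1) 1).foldl (fun acc y =>
      (table.getD (x + y) []).foldl (fun acc z =>
        if z ≥ y then (acc.1 + 1, acc.2 ++ [[x, y, z]]) else acc)
        acc) acc) ((0 : Int), ([] : List (List Int)))

-- ===== PRECONDITION & SPEC =====
def Spec_num_integral_paths (max_len : Int) (out : Int × List (List Int)) : Prop := out = num_integral_paths_alt max_len
instance (max_len : Int) (out : Int × List (List Int)) : Decidable (Spec_num_integral_paths max_len out) := by unfold Spec_num_integral_paths; infer_instance

-- ===== CLAIM (what is proved, stated in full; the proofs are below) =====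
def Claim_equal_num_integral_paths : Prop := ∀ (max_len : Int), Dom_num_integral_paths max_len → Spec_num_integral_paths max_len (num_integral_paths max_len)

-- ===== LEMMAS AND PROOFS =====

-- Looking up a key in a dict built by inserting a value f s under each key s of a list.
theorem getD_foldl_insert_fun {ν : Type} (l : List Int) (f : Int → ν)
    (d : PySem.Dict Int ν) (k : Int) (d0 : ν) :
    (l.foldl (fun d s => d.insert s (f s)) d).getD k d0
      = if k ∈ l then f k else d.getD k d0 := by
  induction l generalizing d with
  | nil => simp
  | cons a t ih =>
      simp only [List.foldl_cons, ih, List.mem_cons]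
      rw [PySem.Dict.getD_insert]
      by_cases hk : k ∈ t <;> by_cases ha : k = a <;> simp [hk, ha]

-- For 1 ≤ x ≤ y ≤ z the minimum of the three candidate path squares is z² + (x+y)².
theorem min_diag_eq (x y z : Int) (hx : 1 ≤ x) (hxy : x ≤ y) (hyz : y ≤ z) :
    min (min (x * x + (y + z) * (y + z)) (y * y + (x + z) * (x + z)))
        (z * z + (x + y) * (x + y)) = z * z + (x + y) * (x + y) := by
  have h1 : z * z + (x + y) * (x + y) ≤ x * x + (y + z) * (y + z) := by nlinarith
  have h2 : z * z + (x + y) * (x + y) ≤ y * y + (x + z) * (x + z) := by nlinarith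
  omega

-- range(y, m+1) is the tail of range(1, m+1) from y on, as a filter (1 ≤ y ≤ m+1).
theorem pyRange_eq_filter_le (y b : Int) (h1 : 1 ≤ y) (h2 : y ≤ b) :
    PySem.List.pyRange y b 1 = (PySem.List.pyRange 1 b 1).filter (fun z => decide (z ≥ y)) := by
  rw [PySem.List.pyRange_one_append 1 y b h1 h2, List.filter_append]
  have hl : (PySem.List.pyRange 1 y 1).filter (fun z => decide (z ≥ y)) = [] := by
    rw [List.filter_eq_nil_iff]
    intro a ha
    have := (PySem.List.mem_pyRange_one).1 ha
    simp only [ge_iff_le, decide_eq_true_eq]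
    omega
  have hr : (PySem.List.pyRange y b 1).filter (fun z => decide (z ≥ y)) = PySem.List.pyRange y b 1 := by
    rw [List.filter_eq_self]
    intro a ha
    have := (PySem.List.mem_pyRange_one).1 ha
    simp only [ge_iff_le, decide_eq_true_eq]
    omega
  rw [hl, hr, List.nil_append]

-- The two inner loops agree for the fixed x, y produced by the outer loops.
theorem inner_eq (m x y : Int) (hx : 1 ≤ x) (hxy : x ≤ y) (hy : y ≤ m)
    (squares : PySem.Set Int) (acc : Int × List (List Int)) :
    (PySem.List.pyRange y (m + 1) 1).foldl (fun acc z =>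
        if squares.contains (min (min (x * x + (y + z) * (y + z)) (y * y + (x + z) * (x + z)))
            (z * z + (x + y) * (x + y))) then (acc.1 + 1, acc.2 ++ [[x, y, z]]) else acc) acc
      = ((PySem.List.pyRange 1 (m + 1) 1).filter
            (fun z => squares.contains (z * z + (x + y) * (x + y)))).foldl (fun acc z =>
        if z ≥ y then (acc.1 + 1, acc.2 ++ [[x, y, z]]) else acc) acc := by
  calc (PySem.List.pyRange y (m + 1) 1).foldl (fun acc z =>
          if squares.contains (min (min (x * x + (y + z) * (y + z)) (y * y + (x + z) * (x + z)))
              (z * z + (x + y) * (x + y))) then (acc.1 + 1, acc.2 ++ [[x, y, z]]) else acc) acc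
      = (PySem.List.pyRange y (m + 1) 1).foldl (fun acc z =>
          if squares.contains (z * z + (x + y) * (x + y))
          then (acc.1 + 1, acc.2 ++ [[x, y, z]]) else acc) acc := by
        apply PySem.List.foldl_congr_mem
        intro acc z hz
        have hz' := (PySem.List.mem_pyRange_one).1 hz
        rw [min_diag_eq x y z hx hxy (by omega)]
    _ = ((PySem.List.pyRange 1 (m + 1) 1).filter
            (fun z => squares.contains (z * z + (x + y) * (x + y)))).foldl (fun acc z =>
          if z ≥ y then (acc.1 + 1, acc.2 ++ [[x, y, z]]) else acc) acc := by
        rw [pyRange_eq_filter_le y (m + 1) (by omega) (by omega),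
            List.foldl_filter, List.foldl_filter]
        congr 1
        funext a z
        by_cases hC : squares.contains (z * z + (x + y) * (x + y)) <;>
          by_cases hD : z ≥ y <;> simp_all

-- ===== VERDICT (by name: the statement is the Claim_ definition above) =====
theorem num_integral_paths_spec : Claim_equal_num_integral_paths := by
  intro m _
  unfold Spec_num_integral_paths num_integral_paths num_integral_paths_alt
  apply PySem.List.foldl_congr_mem
  intro acc x hx
  have hx' := (PySem.List.mem_pyRange_one).1 hx
  apply PySem.List.foldl_congr_mem
  intro acc y hy
  have hy' := (PySem.List.mem_pyRange_one).1 hy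
  rw [getD_foldl_insert_fun]
  have hmem : x + y ∈ PySem.List.pyRange 2 (2 * m + 1) 1 := by
    rw [PySem.List.mem_pyRange_one]; omega
  rw [if_pos hmem]
  exact inner_eq m x y (by omega) (by omega) (by omega) _ acc
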